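-- pv_equiv track=rewrite | github.com/mohammad-Gazali/Hassanein_site--Mosque-Management-System- | main_app/default_dictionary.py | check_for_cer
-- ===== SOURCE A (Python) =====
-- def check_for_cer(dictionary):
--     result = {}
--     for i in dictionary:
--         non = 0
--         old = 0
--         new = 0
--         error = 0
--         for j in dictionary[i]:
--             for k in dictionary[i][j]:
--                 if dictionary[i][j][k] == 'NON':
--                     non += 1
--                 elif dictionary[i][j][k] == 'OLD':
--                     old += 1
--                 elif dictionary[i][j][k] == 'NEW':
--                     new += 1
--                 else:
--                     error += 1
--         if error != 0:
--             result[i] = 'ERROR'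
--         elif non != 0:
--             result[i] = 'NON'
--         elif new != 0:
--             result[i] = 'NEW'
--         else:
--             result[i] = 'OLD'
--
--     return result
-- ===== SOURCE B (Python) =====
-- def check_for_cer(dictionary):
--     result = {}
--     for i in dictionary:
--         vs = [v for inner in dictionary[i].values() for v in inner.values()]
--         label = 'OLD'
--         if 'NEW' in vs:
--             label = 'NEW'
--         if 'NON' in vs:
--             label = 'NON'
--         if any(v not in ('NON', 'OLD', 'NEW') for v in vs):
--             label = 'ERROR'
--         result[i] = label
--     return result
-- ===== Notes on version B (the rewrite author's own statement) =====
-- stated objective: alternative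
-- what changed: Replaces A's single accumulating pass (four counters plus an error/non/new/old if-elif priority ladder) with staged membership passes: the flattened leaf list is scanned once per severity level in ascending order, each positive test unconditionally overwriting the label (last write wins), so no counters and no elif ladder exist.
import Mathlib
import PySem

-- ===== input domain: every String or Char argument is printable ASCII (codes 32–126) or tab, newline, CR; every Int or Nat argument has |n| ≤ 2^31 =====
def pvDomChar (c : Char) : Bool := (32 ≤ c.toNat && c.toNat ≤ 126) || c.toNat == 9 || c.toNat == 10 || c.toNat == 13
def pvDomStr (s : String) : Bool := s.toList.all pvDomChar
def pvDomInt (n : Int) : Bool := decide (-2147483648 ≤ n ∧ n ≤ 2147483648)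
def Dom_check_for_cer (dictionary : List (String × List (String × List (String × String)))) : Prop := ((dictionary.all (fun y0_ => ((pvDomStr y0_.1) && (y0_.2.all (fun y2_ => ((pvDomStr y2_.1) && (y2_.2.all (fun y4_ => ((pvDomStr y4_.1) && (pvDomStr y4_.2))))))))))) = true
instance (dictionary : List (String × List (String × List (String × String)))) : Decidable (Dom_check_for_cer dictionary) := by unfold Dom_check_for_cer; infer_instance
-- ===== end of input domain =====

-- B replaces A's single counting pass and if/elif priority ladder with staged membership
-- scans of the flattened leaves, overwriting the label per severity level (objective: alternative).


-- ===== PORT A =====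
-- the four counter variables non/old/new/error are carried as one 4-tuple of Ints
def pvCountStep (st : Int × Int × Int × Int) (v : String) : Int × Int × Int × Int :=
  if v = "NON" then (st.1 + 1, st.2.1, st.2.2.1, st.2.2.2)
  else if v = "OLD" then (st.1, st.2.1 + 1, st.2.2.1, st.2.2.2)
  else if v = "NEW" then (st.1, st.2.1, st.2.2.1 + 1, st.2.2.2)
  else (st.1, st.2.1, st.2.2.1, st.2.2.2 + 1)

def check_for_cer (dictionary : List (String × List (String × List (String × String)))) : List (String × String) :=
  (dictionary.foldl (fun result p =>
      let st := p.2.foldl (fun st q => q.2.foldl (fun st r => pvCountStep st r.2) st) (0, 0, 0, 0)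
      result.insert p.1
        (if st.2.2.2 ≠ 0 then "ERROR"
         else if st.1 ≠ 0 then "NON"
         else if st.2.2.1 ≠ 0 then "NEW"
         else "OLD")) PySem.Dict.empty).items

-- ===== PORT B =====
-- v not in ('NON', 'OLD', 'NEW')
def pvNotNamed (v : String) : Bool := !(v == "NON" || v == "OLD" || v == "NEW")

-- the staged overwrites of the variable `label`, in B's order (each `let` is one `if` of Source B)
def pvLabelB (vs : List String) : String :=
  let label := "OLD"
  let label := if vs.contains "NEW" then "NEW" else label
  let label := if vs.contains "NON" then "NON" else label
  if vs.any pvNotNamed then "ERROR" else label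

def check_for_cer_alt (dictionary : List (String × List (String × List (String × String)))) : List (String × String) :=
  (dictionary.foldl (fun result p =>
      result.insert p.1
        (pvLabelB (p.2.flatMap (fun q => q.2.map (fun r => r.2))))) PySem.Dict.empty).items

-- ===== PRECONDITION & SPEC =====
def Spec_check_for_cer (dictionary : List (String × List (String × List (String × String)))) (out : List (String × String)) : Prop := out = check_for_cer_alt dictionary
instance (dictionary : List (String × List (String × List (String × String)))) (out : List (String × String)) : Decidable (Spec_check_for_cer dictionary out) := by unfold Spec_check_for_cer; infer_instance

-- ===== CLAIM (what is proved, stated in full; the proofs are below) =====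
def Claim_equal_check_for_cer : Prop := ∀ (dictionary : List (String × List (String × List (String × String)))), Dom_check_for_cer dictionary → Spec_check_for_cer dictionary (check_for_cer dictionary)

-- ===== LEMMAS AND PROOFS =====

theorem pvCountStep_foldl (vs : List String) (n o w e : Int) :
    vs.foldl pvCountStep (n, o, w, e) =
      (n + vs.count "NON", o + vs.count "OLD", w + vs.count "NEW", e + vs.countP pvNotNamed) := by
  induction vs generalizing n o w e with
  | nil => simp
  | cons v vs ih =>
    simp only [List.foldl_cons, List.count_cons, List.countP_cons, pvCountStep, pvNotNamed]
    by_cases h1 : v = "NON" <;> by_cases h2 : v = "OLD" <;> by_cases h3 : v = "NEW" <;>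
      simp_all <;> omega

-- A's if-elif ladder on the four counters equals B's staged overwrites, per flattened leaf list
theorem ladder_eq (vs : List String) :
    (let st := vs.foldl pvCountStep ((0 : Int), (0 : Int), (0 : Int), (0 : Int))
     if st.2.2.2 ≠ 0 then "ERROR"
     else if st.1 ≠ 0 then "NON"
     else if st.2.2.1 ≠ 0 then "NEW"
     else "OLD") = pvLabelB vs := by
  rw [pvCountStep_foldl]
  simp only [pvLabelB, zero_add]
  have hN : ((vs.count "NON" : Int) ≠ 0) ↔ vs.contains "NON" := by
    rw [Int.natCast_ne_zero, ← Nat.pos_iff_ne_zero, List.count_pos_iff]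
    simp
  have hW : ((vs.count "NEW" : Int) ≠ 0) ↔ vs.contains "NEW" := by
    rw [Int.natCast_ne_zero, ← Nat.pos_iff_ne_zero, List.count_pos_iff]
    simp
  have hE : ((vs.countP pvNotNamed : Int) ≠ 0) ↔ vs.any pvNotNamed := by
    rw [Int.natCast_ne_zero, ← Nat.pos_iff_ne_zero, List.countP_pos_iff]
    simp [List.any_eq_true]
  split_ifs <;> simp_all

-- the per-key labels agree
theorem label_eq (sub : List (String × List (String × String))) :
    (let st := sub.foldl (fun st q => q.2.foldl (fun st r => pvCountStep st r.2) st) ((0 : Int), (0 : Int), (0 : Int), (0 : Int))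
     if st.2.2.2 ≠ 0 then "ERROR"
     else if st.1 ≠ 0 then "NON"
     else if st.2.2.1 ≠ 0 then "NEW"
     else "OLD") =
    pvLabelB (sub.flatMap (fun q => q.2.map (fun r => r.2))) := by
  have hnest : sub.foldl (fun st q => q.2.foldl (fun st r => pvCountStep st r.2) st)
      ((0 : Int), (0 : Int), (0 : Int), (0 : Int)) =
      (sub.flatMap (fun q => q.2.map (fun r => r.2))).foldl pvCountStep (0, 0, 0, 0) := by
    rw [List.foldl_flatMap]
    congr 1
    funext st q
    rw [List.foldl_map]
  rw [hnest]
  exact ladder_eq _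

-- ===== VERDICT (by name: the statement is the Claim_ definition above) =====
theorem check_for_cer_spec : Claim_equal_check_for_cer := by
  intro dictionary _
  unfold Spec_check_for_cer check_for_cer check_for_cer_alt
  congr 1
  congr 1
  funext result p
  exact congrArg (result.insert p.1) (label_eq p.2)
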